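-- pv_equiv track=rewrite | github.com/FaiZaman/Dynamic-Heuristic-Local-Alignments | FASTA.py | get_index_table
-- ===== SOURCE A (Python) =====
-- def get_index_table(ktup, seq1):
--
-- 	index_table = {}
--
-- 	# go through seq1 and store ktup strings in index table
-- 	for letter_index in range(0, len(seq1) - ktup + 1):
-- 		match = seq1[letter_index:letter_index + ktup]
--
-- 		if match in index_table:
-- 			index_table[match].append(letter_index)
-- 		else:
-- 			index_table[match] = [letter_index]
--
-- 	return index_table
-- ===== SOURCE B (Python) =====
-- def get_index_table(ktup, seq1):
--     # materialize all ktup substrings, dedup for keys (first-occurrence order),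
--     # then gather each key's positions with a per-key comprehension
--     subs = [seq1[i:i + ktup] for i in range(len(seq1) - ktup + 1)]
--     keys = list(dict.fromkeys(subs))
--     return {s: [i for i, t in enumerate(subs) if t == s] for s in keys}
-- ===== Notes on version B (the rewrite author's own statement) =====
-- stated objective: alternative
-- what changed: Replaces A's single-pass incremental dict accumulation with a materialize-dedup-collect decomposition: build the list of all ktup substrings, dedup it for the keys, then gather each key's position list with a per-key comprehension.
import Mathlib
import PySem

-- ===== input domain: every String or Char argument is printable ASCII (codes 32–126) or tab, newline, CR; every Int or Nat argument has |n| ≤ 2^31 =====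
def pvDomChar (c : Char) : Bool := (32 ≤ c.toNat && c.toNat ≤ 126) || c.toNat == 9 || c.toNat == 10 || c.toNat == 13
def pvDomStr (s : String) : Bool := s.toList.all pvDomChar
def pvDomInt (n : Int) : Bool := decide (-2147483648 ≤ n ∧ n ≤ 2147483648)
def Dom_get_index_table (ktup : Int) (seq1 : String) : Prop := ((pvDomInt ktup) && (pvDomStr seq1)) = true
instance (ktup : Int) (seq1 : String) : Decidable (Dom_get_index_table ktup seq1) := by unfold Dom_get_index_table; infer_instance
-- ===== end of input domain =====

-- B replaces A's incremental dict accumulation by: materialize all substrings, dedup them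
-- for the keys, then collect each key's positions with a per-key comprehension (alternative
-- decomposition, same return value).

-- ===== PORT A =====
-- loop body of A: append the position if the substring is already a key, else start a new entry
def pvStepA (d : PySem.Dict String (List Int)) (i : Int) (m : String) :
    PySem.Dict String (List Int) :=
  if d.contains m then d.modify m [] (fun l => l ++ [i]) else d.insert m [i]

def get_index_table (ktup : Int) (seq1 : String) : List (String × List Int) :=
  ((PySem.List.pyRange 0 (PySem.Str.len seq1 - ktup + 1)).foldl
    (fun d i => pvStepA d i (PySem.Str.slice seq1 (some i) (some (i + ktup))))
    PySem.Dict.empty).items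

-- ===== PORT B =====
def get_index_table_alt (ktup : Int) (seq1 : String) : List (String × List Int) :=
  let subs := (PySem.List.pyRange 0 (PySem.Str.len seq1 - ktup + 1)).map
      (fun i => PySem.Str.slice seq1 (some i) (some (i + ktup)))
  let keys := PySem.List.dedup subs
  keys.map (fun s => (s, (PySem.List.enumerate subs 0).filterMap
      (fun p => if p.2 = s then some p.1 else none)))

-- ===== PRECONDITION & SPEC =====
def Spec_get_index_table (ktup : Int) (seq1 : String) (out : List (String × List Int)) : Prop := out = get_index_table_alt ktup seq1
instance (ktup : Int) (seq1 : String) (out : List (String × List Int)) : Decidable (Spec_get_index_table ktup seq1 out) := by unfold Spec_get_index_table; infer_instance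

-- ===== CLAIM (what is proved, stated in full; the proofs are below) =====
def Claim_equal_get_index_table : Prop := ∀ (ktup : Int) (seq1 : String), Dom_get_index_table ktup seq1 → Spec_get_index_table ktup seq1 (get_index_table ktup seq1)

-- ===== LEMMAS AND PROOFS =====

-- positions of key s in the pair list ps
def pvPos (ps : List (Int × String)) (s : String) : List Int :=
  ps.filterMap (fun p => if p.2 = s then some p.1 else none)

theorem pvPos_append_singleton (ps : List (Int × String)) (p : Int × String) (s : String) :
    pvPos (ps ++ [p]) s = pvPos ps s ++ (if p.2 = s then [p.1] else []) := by
  simp only [pvPos, List.filterMap_append]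
  split_ifs with h <;> simp [h]

theorem pvPos_nil_of_not_mem (ps : List (Int × String)) (k : String)
    (h : k ∉ ps.map Prod.snd) : pvPos ps k = [] := by
  rw [pvPos, List.filterMap_eq_nil_iff]
  intro p hp
  have : p.2 ≠ k := fun he => h (he ▸ List.mem_map_of_mem hp)
  simp [this]

theorem pvFind_map (g : String → String × List Int) (hg : ∀ s, (g s).1 = s)
    (keys : List String) (k : String) (hk : k ∈ keys) :
    (keys.map g).find? (fun q => q.1 == k) = some (g k) := by
  induction keys with
  | nil => cases hk
  | cons a t ih =>
    by_cases h : a = k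
    · subst h; simp [hg]
    · rcases List.mem_cons.mp hk with h' | h'
      · exact absurd h'.symm h
      · simp [hg, h, ih h']

theorem pvAny_map (g : String → String × List Int) (hg : ∀ s, (g s).1 = s)
    (keys : List String) (k : String) :
    (keys.map g).any (fun q => q.1 == k) = keys.any (fun s => s == k) := by
  induction keys with
  | nil => rfl
  | cons a t ih =>
    rw [List.map_cons, List.any_cons, List.any_cons, hg a, ih]

-- main invariant: A's dict fold over any pair list yields exactly B's dedup-then-collect table
theorem pvFold_eq (ps : List (Int × String)) :
    (ps.foldl (fun d p => pvStepA d p.1 p.2) PySem.Dict.empty).items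
      = (PySem.List.dedup (ps.map Prod.snd)).map (fun s => (s, pvPos ps s)) := by
  induction ps using List.reverseRecOn with
  | nil => simp [PySem.List.dedup, PySem.Set.ofList, PySem.Set.empty, PySem.Dict.empty, pvPos]
  | append_singleton ps p ih =>
    have hkeys : PySem.List.dedup ((ps ++ [p]).map Prod.snd)
        = PySem.Set.add (PySem.List.dedup (ps.map Prod.snd)) p.2 := by
      simp [PySem.List.dedup, PySem.Set.ofList, List.foldl_append]
    set keys := PySem.List.dedup (ps.map Prod.snd) with hK
    have hmemkeys : ∀ x, x ∈ keys ↔ x ∈ ps.map Prod.snd := by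
      intro x; rw [hK]; exact PySem.List.mem_dedup (xs := ps.map Prod.snd) (x := x)
    set d := ps.foldl (fun d p => pvStepA d p.1 p.2) PySem.Dict.empty with hd
    have hitems : d.items = keys.map (fun s => (s, pvPos ps s)) := ih
    have hg1 : ∀ s, ((fun s => (s, pvPos ps s)) s).1 = s := fun _ => rfl
    have hcont : d.contains p.2 = true ↔ p.2 ∈ ps.map Prod.snd := by
      rw [PySem.Dict.contains, hitems, pvAny_map _ hg1, List.any_eq_true]
      constructor
      · rintro ⟨x, hx, he⟩
        exact (beq_iff_eq.mp he) ▸ (hmemkeys x).mp hx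
      · intro h; exact ⟨p.2, (hmemkeys p.2).mpr h, beq_self_eq_true _⟩
    rw [List.foldl_append]
    simp only [List.foldl_cons, List.foldl_nil]
    rw [← hd]
    by_cases hmem : p.2 ∈ ps.map Prod.snd
    · -- existing key: modify in place; dedup unchanged
      have hc : d.contains p.2 = true := hcont.mpr hmem
      have hfind : d.items.find? (fun q => q.1 == p.2) = some (p.2, pvPos ps p.2) := by
        rw [hitems]; exact pvFind_map _ hg1 _ _ ((hmemkeys p.2).mpr hmem)
      have hgetD : d.getD p.2 [] = pvPos ps p.2 := by
        simp [PySem.Dict.getD, PySem.Dict.get?, hfind]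
      rw [pvStepA, if_pos hc, PySem.Dict.modify, hgetD, PySem.Dict.insert, if_pos hc]
      have hset : PySem.Set.add keys p.2 = keys := by
        rw [PySem.Set.add, if_pos]
        rw [PySem.Set.contains_iff]; exact (hmemkeys p.2).mpr hmem
      rw [hkeys, hset, hitems]
      simp only [List.map_map]
      apply List.map_congr_left
      intro s hs
      by_cases hsp : s = p.2
      · subst hsp
        simp [Function.comp, pvPos_append_singleton]
      · simp [Function.comp, hsp, pvPos_append_singleton, Ne.symm hsp]
    · -- new key: append at the end; dedup gains the key
      have hc : d.contains p.2 = false :=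
        Bool.eq_false_iff.mpr (fun h => hmem (hcont.mp h))
      rw [pvStepA, if_neg (by simp [hc]), PySem.Dict.insert, if_neg (by simp [hc])]
      have hset : PySem.Set.add keys p.2 = keys ++ [p.2] := by
        rw [PySem.Set.add, if_neg]
        simp only [PySem.Set.contains_iff]
        intro h; exact hmem ((hmemkeys p.2).mp h)
      have hmapeq : keys.map (fun s => (s, pvPos (ps ++ [p]) s))
          = keys.map (fun s => (s, pvPos ps s)) := by
        apply List.map_congr_left
        intro s hs
        have hsp : p.2 ≠ s := fun he => hmem (by rw [he]; exact (hmemkeys s).mp hs)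
        simp [pvPos_append_singleton, hsp]
      have hnew : pvPos (ps ++ [p]) p.2 = [p.1] := by
        simp [pvPos_append_singleton, pvPos_nil_of_not_mem ps p.2 hmem]
      rw [hkeys, hset, hitems, List.map_append, hmapeq]
      simp [hnew]

-- fold of A's loop body over a range = fold of the uncurried body over the (index, substring) pairs
theorem pvFoldl_pair (l : List Int) (f : Int → String) (init : PySem.Dict String (List Int)) :
    l.foldl (fun d i => pvStepA d i (f i)) init
      = (l.map (fun i => (i, f i))).foldl (fun d p => pvStepA d p.1 p.2) init := by
  induction l generalizing init with
  | nil => rfl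
  | cons a t ih => simp only [List.foldl_cons, List.map_cons]; exact ih _

-- enumerate of a mapped integer range pairs each range element with its image
theorem pvEnum_aux (f : Int → String) (k : Nat) : ∀ (a : Int),
    PySem.List.enumerate ((PySem.List.pyRange a (a + k)).map f) a
      = (PySem.List.pyRange a (a + k)).map (fun i => (i, f i)) := by
  induction k with
  | zero =>
    intro a
    rw [PySem.List.pyRange_one_eq_nil (by omega : a + ((0 : Nat) : Int) ≤ a)]
    rfl
  | succ n ih =>
    intro a
    rw [PySem.List.pyRange_one_cons (by push_cast; omega : a < a + (((n : Nat) + 1 : Nat) : Int))]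
    simp only [List.map_cons, PySem.List.enumerate]
    have h2 : a + (((n : Nat) + 1 : Nat) : Int) = (a + 1) + ((n : Nat) : Int) := by
      push_cast; omega
    rw [h2, ih (a + 1)]

theorem pvEnum_map_pyRange (f : Int → String) (a b : Int) :
    PySem.List.enumerate ((PySem.List.pyRange a b).map f) a
      = (PySem.List.pyRange a b).map (fun i => (i, f i)) := by
  by_cases h : b ≤ a
  · rw [PySem.List.pyRange_one_eq_nil h]; rfl
  · have hb : b = a + (((b - a).toNat : Nat) : Int) := by omega
    rw [hb]; exact pvEnum_aux f (b - a).toNat a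

-- ===== VERDICT (by name: the statement is the Claim_ definition above) =====
theorem get_index_table_spec : Claim_equal_get_index_table := by
  intro ktup seq1 _
  unfold Spec_get_index_table
  simp only [get_index_table, get_index_table_alt]
  rw [pvFoldl_pair, pvFold_eq, List.map_map]
  have hsnd : (Prod.snd ∘ fun i => (i, PySem.Str.slice seq1 (some i) (some (i + ktup))))
      = fun i => PySem.Str.slice seq1 (some i) (some (i + ktup)) := rfl
  rw [hsnd, pvEnum_map_pyRange]
  simp [pvPos]
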